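-- pv_equiv track=rewrite | github.com/3hir03pectra/PassivC5- | pyCXRS/fine_structure.py | count_scans
-- ===== SOURCE A (Python) =====
-- def count_scans(names):
--     # Counts how many times in $names$ appears <pattern> and return counters for
--     # <pattern>='Ne', 'Ni', 'Te', 'Ti', 'Zef', or 'Bt'
--     N_ne=0
--     N_ni=0
--     N_te=0
--     N_ti=0
--     N_zef=0
--     N_bt=0
--     for key in names:
--         if (key.find('Ne')!=-1):
--             N_ne+=1
--         if (key.find('Ni')!=-1):
--             N_ni+=1
--         if (key.find('Te')!=-1):
--             N_te+=1
--         if (key.find('Ti')!=-1):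
--             N_ti+=1
--         if (key.find('Zeff')!=-1):
--             N_zef+=1
--         if (key.find('Bt')!=-1):
--             N_bt+=1
--     return N_ne, N_ni, N_te, N_ti, N_zef, N_bt
-- ===== SOURCE B (Python) =====
-- def count_scans(names):
--     names = list(names)
--     def cnt(p):
--         return sum(1 for key in names if key.find(p) != -1)
--     return cnt('Ne'), cnt('Ni'), cnt('Te'), cnt('Ti'), cnt('Zeff'), cnt('Bt')
-- ===== Notes on version B (the rewrite author's own statement) =====
-- stated objective: simpler
-- what changed: Replaces A's single pass maintaining six counters with six independent per-pattern scans, each a one-line sum over the list.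
import Mathlib
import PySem

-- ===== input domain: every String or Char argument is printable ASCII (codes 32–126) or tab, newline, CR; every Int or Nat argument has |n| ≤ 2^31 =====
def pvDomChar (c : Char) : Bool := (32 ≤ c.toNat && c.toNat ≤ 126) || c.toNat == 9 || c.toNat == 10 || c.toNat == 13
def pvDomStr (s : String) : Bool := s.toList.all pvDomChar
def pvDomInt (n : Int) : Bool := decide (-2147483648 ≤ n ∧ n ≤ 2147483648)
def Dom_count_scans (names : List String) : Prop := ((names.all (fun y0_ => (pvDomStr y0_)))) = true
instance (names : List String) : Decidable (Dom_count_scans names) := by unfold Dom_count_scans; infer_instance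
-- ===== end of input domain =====

-- B replaces A's single pass with six counters by six independent per-pattern scans (simpler decomposition, same cost).
-- ===== PORT A =====
def count_scans (names : List String) : Int × Int × Int × Int × Int × Int :=
  let st := names.foldl (fun (st : Int × Int × Int × Int × Int × Int) key =>
    let (n_ne, n_ni, n_te, n_ti, n_zef, n_bt) := st
    let n_ne := if PySem.Str.find key "Ne" ≠ -1 then n_ne + 1 else n_ne
    let n_ni := if PySem.Str.find key "Ni" ≠ -1 then n_ni + 1 else n_ni
    let n_te := if PySem.Str.find key "Te" ≠ -1 then n_te + 1 else n_te
    let n_ti := if PySem.Str.find key "Ti" ≠ -1 then n_ti + 1 else n_ti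
    let n_zef := if PySem.Str.find key "Zeff" ≠ -1 then n_zef + 1 else n_zef
    let n_bt := if PySem.Str.find key "Bt" ≠ -1 then n_bt + 1 else n_bt
    (n_ne, n_ni, n_te, n_ti, n_zef, n_bt)) (0, 0, 0, 0, 0, 0)
  st

-- ===== PORT B =====
-- one independent scan per pattern: sum(1 for key in names if key.find(p) != -1)
def pvCnt (names : List String) (p : String) : Int :=
  (names.foldl (fun (acc : Int) key => if PySem.Str.find key p ≠ -1 then acc + 1 else acc) 0)

def count_scans_alt (names : List String) : Int × Int × Int × Int × Int × Int :=
  (pvCnt names "Ne", pvCnt names "Ni", pvCnt names "Te", pvCnt names "Ti",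
   pvCnt names "Zeff", pvCnt names "Bt")

-- ===== PRECONDITION & SPEC =====
def Spec_count_scans (names : List String) (out : Int × Int × Int × Int × Int × Int) : Prop := out = count_scans_alt names
instance (names : List String) (out : Int × Int × Int × Int × Int × Int) : Decidable (Spec_count_scans names out) := by unfold Spec_count_scans; infer_instance

-- ===== CLAIM (what is proved, stated in full; the proofs are below) =====
def Claim_equal_count_scans : Prop := ∀ (names : List String), Dom_count_scans names → Spec_count_scans names (count_scans names)

-- ===== LEMMAS AND PROOFS =====

-- ===== VERDICT (by name: the statement is the Claim_ definition above) =====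
lemma count_scans_eq (names : List String) : count_scans names = count_scans_alt names := by
  induction names using List.reverseRecOn with
  | nil => rfl
  | append_singleton xs x ih =>
    simp only [count_scans, count_scans_alt, pvCnt, List.foldl_append, List.foldl_cons,
      List.foldl_nil] at ih ⊢
    rw [ih]

theorem count_scans_spec : Claim_equal_count_scans := by
  intro names _
  unfold Spec_count_scans
  exact count_scans_eq names
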